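-- pv_equiv track=rewrite | github.com/kubengine/kubengine | src/cli/models.py | _is_valid_host
-- ===== SOURCE A (Python) =====
-- def _is_valid_host(host: str) -> bool:
--     """Validate if host string is a valid IP or hostname.
--
--     Args:
--         host: Host string to validate
--
--     Returns:
--         True if host format is valid
--     """
--     # Simple validation for demonstration
--     # In production, you might want more sophisticated validation
--     if not host:
--         return False
--
--     # Check for valid characters
--     valid_chars = (
--         "abcdefghijklmnopqrstuvwxyz"
--         "ABCDEFGHIJKLMNOPQRSTUVWXYZ"
--         "0123456789"
--         ".-_"
--     )
--
--     return all(char in valid_chars for char in host)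
-- ===== SOURCE B (Python) =====
-- import re
--
-- _HOST_RE = re.compile(r"[A-Za-z0-9._-]+")
--
--
-- def _is_valid_host(host: str) -> bool:
--     """Validate host with a single anchored regex instead of a per-char loop."""
--     return bool(_HOST_RE.fullmatch(host))
-- ===== Notes on version B (the rewrite author's own statement) =====
-- stated objective: idiomatic
-- what changed: Replaces the explicit per-character membership loop over a 67-char alphabet string with a single precompiled anchored regular expression (re.fullmatch of [A-Za-z0-9._-]+, whose + makes the empty string fail).
import Mathlib
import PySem

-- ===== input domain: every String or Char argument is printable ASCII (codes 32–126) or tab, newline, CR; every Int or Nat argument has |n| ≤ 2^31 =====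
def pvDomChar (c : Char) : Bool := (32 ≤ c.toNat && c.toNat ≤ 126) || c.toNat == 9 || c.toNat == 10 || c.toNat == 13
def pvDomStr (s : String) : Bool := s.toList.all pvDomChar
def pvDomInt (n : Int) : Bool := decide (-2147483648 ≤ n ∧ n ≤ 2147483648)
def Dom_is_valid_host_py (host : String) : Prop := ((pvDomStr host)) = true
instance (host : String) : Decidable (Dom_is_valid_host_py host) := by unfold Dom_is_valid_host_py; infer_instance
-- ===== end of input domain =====

-- B replaces A's per-character membership loop over a 67-char alphabet string by a single
-- anchored regular expression [A-Za-z0-9._-]+ (ported here as its character-class automaton).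

-- ===== PORT A =====
-- the `valid_chars` alphabet string of A, as its list of characters
def pvValidChars : List Char :=
  "abcdefghijklmnopqrstuvwxyzABCDEFGHIJKLMNOPQRSTUVWXYZ0123456789.-_".toList

-- `char in valid_chars` for a single character is exactly membership in the char list
def is_valid_host_py (host : String) : Bool :=
  if host.toList.isEmpty then false
  else host.toList.all (fun c => pvValidChars.contains c)

-- ===== PORT B =====
-- the regex character class [A-Za-z0-9._-] (exact hand port of the regex's char class)
def pvAllowed (c : Char) : Bool :=
  ('A' ≤ c && c ≤ 'Z') || ('a' ≤ c && c ≤ 'z') || ('0' ≤ c && c ≤ '9')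
    || c == '.' || c == '_' || c == '-'

-- fullmatch of CLASS+ : at least one character, and every character matches the class
def is_valid_host_py_alt (host : String) : Bool :=
  !host.toList.isEmpty && host.toList.all pvAllowed

-- ===== PRECONDITION & SPEC =====
def Spec_is_valid_host_py (host : String) (out : Bool) : Prop := out = is_valid_host_py_alt host
instance (host : String) (out : Bool) : Decidable (Spec_is_valid_host_py host out) := by unfold Spec_is_valid_host_py; infer_instance

-- ===== CLAIM (what is proved, stated in full; the proofs are below) =====
def Claim_equal_is_valid_host_py : Prop := ∀ (host : String), Dom_is_valid_host_py host → Spec_is_valid_host_py host (is_valid_host_py host)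

-- ===== LEMMAS AND PROOFS =====

lemma char_beq_toNat (c d : Char) : (c == d) = (c.toNat == d.toNat) := by
  by_cases h : c = d
  · subst h; simp
  · have h' : c.toNat ≠ d.toNat := fun he => h (by
      have := congrArg Char.ofNat he
      rwa [Char.ofNat_toNat, Char.ofNat_toNat] at this)
    simp [h, h']

lemma char_le_toNat (c d : Char) : (c ≤ d) ↔ (c.toNat ≤ d.toNat) := by
  rw [Char.le_def]; exact UInt32.le_iff_toNat_le

-- B's character class as a predicate on the code point
def pvClassNat (n : Nat) : Bool :=
  (65 ≤ n && n ≤ 90) || (97 ≤ n && n ≤ 122) || (48 ≤ n && n ≤ 57)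
    || n == 46 || n == 95 || n == 45

lemma allowed_eq_classNat (c : Char) : pvAllowed c = pvClassNat c.toNat := by
  simp [pvAllowed, pvClassNat, char_beq_toNat, char_le_toNat]

set_option maxRecDepth 40000 in
lemma contains_eq_allowed (c : Char) : pvValidChars.contains c = pvAllowed c := by
  rw [allowed_eq_classNat]
  have hmap : pvValidChars.contains c = (pvValidChars.map Char.toNat).contains c.toNat := by
    rw [Bool.eq_iff_iff]
    simp only [List.contains_iff_mem, List.mem_map]
    constructor
    · intro hc; exact ⟨c, hc, rfl⟩
    · rintro ⟨d, hd, he⟩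
      have : d = c := by
        have := congrArg Char.ofNat he
        rwa [Char.ofNat_toNat, Char.ofNat_toNat] at this
      rwa [this] at hd
  rw [hmap]
  by_cases h : c.toNat < 128
  · have key : ∀ n : Fin 128, (pvValidChars.map Char.toNat).contains n.val = pvClassNat n.val := by decide
    exact key ⟨c.toNat, h⟩
  · have h1 : (pvValidChars.map Char.toNat).contains c.toNat = false := by
      have hall : ∀ x ∈ pvValidChars.map Char.toNat, x < 128 := by decide
      simp only [Bool.eq_false_iff, ne_eq, List.contains_iff_mem]
      intro hc; exact h (hall _ hc)
    rw [h1]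
    have hcl : ∀ n : Nat, 128 ≤ n → pvClassNat n = false := by
      intro n hn; simp [pvClassNat]; omega
    exact (hcl _ (by omega)).symm

-- ===== VERDICT (by name: the statement is the Claim_ definition above) =====
theorem is_valid_host_py_spec : Claim_equal_is_valid_host_py := by
  intro host _
  unfold Spec_is_valid_host_py is_valid_host_py is_valid_host_py_alt
  have hall : (fun c => pvValidChars.contains c) = pvAllowed := funext contains_eq_allowed
  rw [hall]
  cases h : host.toList.isEmpty <;> simp only [h, Bool.not_true, Bool.not_false, Bool.false_and, Bool.true_and, if_true] <;> rfl
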